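-- pv_equiv track=rewrite | github.com/sashacmc/mmdiary | src/mmdiary/transcriber/transcriber.py | __extract_caption
-- ===== SOURCE A (Python) =====
-- def __extract_caption(text):
--     res = ""
--     if len(text) != 0:
--         res = text[0].upper()
--         for ch in text[1:]:
--             res += ch
--             if ch in ('\n', '.', '?', '!', ';'):
--                 break
--     return res.strip()
-- ===== SOURCE B (Python) =====
-- def __extract_caption(text):
--     if not text:
--         return ""
--     positions = [p for p in (text.find(d, 1) for d in ('\n', '.', '?', '!', ';')) if p != -1]
--     end = min(positions) + 1 if positions else len(text)
--     return (text[0].upper() + text[1:end]).strip()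
-- ===== Notes on version B (the rewrite author's own statement) =====
-- stated objective: faster
-- what changed: A's single accumulate-and-break Python character loop is replaced by five independent text.find(d, 1) scans, a min-reduction over the found delimiter positions, and one slice text[1:end].
import Mathlib
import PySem

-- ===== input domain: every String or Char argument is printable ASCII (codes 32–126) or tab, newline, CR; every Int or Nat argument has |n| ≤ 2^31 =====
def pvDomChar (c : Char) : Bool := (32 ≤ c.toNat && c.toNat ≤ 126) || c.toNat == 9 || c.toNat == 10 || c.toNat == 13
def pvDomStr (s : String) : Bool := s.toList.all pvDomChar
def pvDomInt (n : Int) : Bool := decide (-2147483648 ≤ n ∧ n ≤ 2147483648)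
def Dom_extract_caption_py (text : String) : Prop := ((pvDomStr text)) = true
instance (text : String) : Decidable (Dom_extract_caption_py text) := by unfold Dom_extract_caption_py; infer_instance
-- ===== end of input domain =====

-- B replaces A's single accumulate-and-break loop by independent find() scans per
-- delimiter plus a min-reduction and one slice (a timing run measured B faster).

-- ===== PORT A =====
def pvIsDelim (ch : Char) : Bool :=
  ch == '\n' || ch == '.' || ch == '?' || ch == '!' || ch == ';'

def pvLoopA : List Char → List Char → List Char
  | [], res => res
  | ch :: rest, res =>
    let res' := res ++ [ch]
    if pvIsDelim ch then res' else pvLoopA rest res'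

def extract_caption_py (text : String) : String :=
  let res : List Char :=
    match text.toList with
    | [] => []
    | c :: rest => pvLoopA rest (PySem.Chars.upper [c])
  String.ofList (PySem.Chars.strip res)

-- ===== PORT B =====
def extract_caption_py_alt (text : String) : String :=
  let cs := text.toList
  match cs with
  | [] => ""
  | c :: _ =>
    let positions := (['\n', '.', '?', '!', ';'].map
        (fun d => PySem.Chars.findFrom cs [d] 1)).filter (fun p => decide (p ≠ -1))
    let e : Int :=
      match PySem.List.min? positions (fun x => x) with
      | some m => m + 1
      | none => (cs.length : Int)
    String.ofList (PySem.Chars.strip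
      (PySem.Chars.upper [c] ++ PySem.Chars.slice cs (some 1) (some e)))

-- ===== PRECONDITION & SPEC =====
def Spec_extract_caption_py (text : String) (out : String) : Prop := out = extract_caption_py_alt text
instance (text : String) (out : String) : Decidable (Spec_extract_caption_py text out) := by unfold Spec_extract_caption_py; infer_instance

-- ===== CLAIM (what is proved, stated in full; the proofs are below) =====
def Claim_equal_extract_caption_py : Prop := ∀ (text : String), Dom_extract_caption_py text → Spec_extract_caption_py text (extract_caption_py text)

-- ===== LEMMAS AND PROOFS =====

-- the five delimiters, in the order B iterates them
def pvDelims : List Char := ['\n', '.', '?', '!', ';']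

-- first index (plus one) of delimiter d in rest, -1 if absent: the value text.find(d, 1) takes
def pvG (d : Char) (rest : List Char) : Int :=
  match rest.findIdx? (· == d) with
  | some j => (j : Int) + 1
  | none => -1

-- the prefix A's loop accumulates: up to and including the first delimiter
def pvTakeIncl : List Char → List Char
  | [] => []
  | ch :: t => if pvIsDelim ch then [ch] else ch :: pvTakeIncl t

theorem pv_singleton_prefix_drop (d : Char) (l : List Char) (n : Nat) (h : n < l.length) :
    [d] <+: l.drop n ↔ l[n] = d := by
  constructor
  · rintro ⟨t, ht⟩
    have h2 : (l.drop n).head? = some d := by rw [← ht]; rfl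
    rw [List.head?_drop] at h2
    have := h2
    simp [List.getElem?_eq_getElem h] at this
    exact this
  · intro hd
    refine ⟨l.drop (n+1), ?_⟩
    have := List.getElem_cons_drop (as := l) h
    rw [hd] at this
    simpa using this

theorem pv_find_singleton (rest : List Char) (d : Char) :
    PySem.Chars.find rest [d] =
      match rest.findIdx? (· == d) with
      | some j => (j : Int)
      | none => -1 := by
  cases h : rest.findIdx? (· == d) with
  | none =>
    rw [List.findIdx?_eq_none_iff] at h
    have : ¬ [d] <:+: rest := by
      rw [List.singleton_infix_iff]
      intro hm
      simpa using h d hm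
    simpa [PySem.Chars.find_eq_neg_one_iff] using this
  | some j =>
    rw [List.findIdx?_eq_some_iff_getElem] at h
    obtain ⟨hj, hdj, hmin⟩ := h
    have hdj' : rest[j] = d := by simpa using hdj
    have hinf : [d] <:+: rest := (List.singleton_infix_iff d rest).mpr (hdj' ▸ List.getElem_mem hj)
    have h0 : 0 ≤ PySem.Chars.find rest [d] := (PySem.Chars.find_nonneg_iff rest [d]).mpr hinf
    obtain ⟨hp, hlt⟩ := PySem.Chars.find_spec h0
    have hle : (PySem.Chars.find rest [d]).toNat ≤ j := by
      by_contra hc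
      exact hlt j (by omega) ((pv_singleton_prefix_drop d rest j hj).mpr hdj')
    have hge : j ≤ (PySem.Chars.find rest [d]).toNat := by
      by_contra hc
      have hjl : (PySem.Chars.find rest [d]).toNat < rest.length := by
        have := PySem.Chars.find_le_length rest [d]
        omega
      have hlt2 : (PySem.Chars.find rest [d]).toNat < j := by omega
      have := (pv_singleton_prefix_drop d rest _ hjl).mp hp
      exact hmin _ hlt2 (by simpa using this)
    have : (PySem.Chars.find rest [d]).toNat = j := le_antisymm hle hge
    simp only []
    omega

theorem pv_findFrom_cons (c : Char) (rest : List Char) (d : Char) :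
    PySem.Chars.findFrom (c :: rest) [d] 1 = pvG d rest := by
  have h1 : (1 : Int) = ((1 : Nat) : Int) := by norm_num
  rw [h1, PySem.Chars.findFrom_natCast (c :: rest) [d] 1 (by simp)]
  simp only [List.drop_succ_cons, List.drop_zero]
  rw [pv_find_singleton]
  cases h : rest.findIdx? (· == d) with
  | none => simp [pvG, h]
  | some j => simp [pvG, h]; omega

theorem pv_loopA_eq (rest acc : List Char) : pvLoopA rest acc = acc ++ pvTakeIncl rest := by
  induction rest generalizing acc with
  | nil => simp [pvLoopA, pvTakeIncl]
  | cons ch t ih =>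
    by_cases h : pvIsDelim ch = true
    · simp [pvLoopA, pvTakeIncl, h]
    · simp [pvLoopA, pvTakeIncl, h, ih]

theorem pv_takeIncl_none (rest : List Char) (h : rest.findIdx? pvIsDelim = none) :
    pvTakeIncl rest = rest := by
  induction rest with
  | nil => rfl
  | cons ch t ih =>
    rw [List.findIdx?_cons] at h
    by_cases hd : pvIsDelim ch = true
    · simp [hd] at h
    · simp [hd] at h
      simp [pvTakeIncl, hd]
      exact ih (List.findIdx?_eq_none_iff.mpr h)

theorem pv_takeIncl_some (rest : List Char) (j : Nat) (h : rest.findIdx? pvIsDelim = some j) :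
    pvTakeIncl rest = rest.take (j + 1) := by
  induction rest generalizing j with
  | nil => simp at h
  | cons ch t ih =>
    rw [List.findIdx?_cons] at h
    by_cases hd : pvIsDelim ch = true
    · simp [hd] at h
      simp [pvTakeIncl, hd, ← h]
    · simp [hd] at h
      obtain ⟨i, hi, rfl⟩ := h
      simp [pvTakeIncl, hd, ih i hi]

theorem pv_min?_one (xs : List Int) (h1 : (1 : Int) ∈ xs) (h : ∀ x ∈ xs, 1 ≤ x) :
    PySem.List.min? xs (fun x => x) = some 1 := by
  cases hm : PySem.List.min? xs (fun x => x) with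
  | none =>
    rw [PySem.List.min?_eq_none_iff] at hm
    subst hm; simp at h1
  | some m =>
    have hmem := PySem.List.min?_mem hm
    have hle : m ≤ 1 := PySem.List.min?_isMin hm 1 h1
    have hge : 1 ≤ m := h m hmem
    simp only [Option.some.injEq]
    omega

theorem pv_min?_map_add_one (ys : List Int) :
    PySem.List.min? (ys.map (· + 1)) (fun x => x) =
      (PySem.List.min? ys (fun x => x)).map (· + 1) := by
  cases hm : PySem.List.min? ys (fun x => x) with
  | none =>
    rw [PySem.List.min?_eq_none_iff] at hm
    subst hm; simp [PySem.List.min?_eq_none_iff]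
  | some m =>
    have hmem := PySem.List.min?_mem hm
    cases hm2 : PySem.List.min? (ys.map (· + 1)) (fun x => x) with
    | none =>
      rw [PySem.List.min?_eq_none_iff, List.map_eq_nil_iff] at hm2
      subst hm2; simp at hmem
    | some m' =>
      have hmem' := PySem.List.min?_mem hm2
      rw [List.mem_map] at hmem'
      obtain ⟨y, hy, rfl⟩ := hmem'
      have h1 : y + 1 ≤ m + 1 :=
        PySem.List.min?_isMin hm2 (m + 1) (by rw [List.mem_map]; exact ⟨m, hmem, rfl⟩)
      have h2 : m ≤ y := PySem.List.min?_isMin hm y hy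
      simp only [Option.map_some, Option.some.injEq]
      omega

theorem pv_filter_step (xs : List Int) (hx : ∀ x ∈ xs, x = -1 ∨ 1 ≤ x) :
    (xs.map (fun p => if p = -1 then (-1 : Int) else p + 1)).filter (fun p => decide (p ≠ -1)) =
      (xs.filter (fun p => decide (p ≠ -1))).map (· + 1) := by
  induction xs with
  | nil => rfl
  | cons x t ih =>
    have hx' : ∀ x ∈ t, x = -1 ∨ 1 ≤ x := fun y hy => hx y (List.mem_cons_of_mem x hy)
    by_cases h : x = -1
    · have hdec : decide ((-1 : Int) ≠ -1) = false := by decide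
      simp only [List.map_cons, h, List.filter_cons, hdec, Bool.false_eq_true, if_false]
      exact ih hx'
    · have h1 : 1 ≤ x := (hx x (List.mem_cons_self)).resolve_left h
      have h2 : x + 1 ≠ -1 := by omega
      have hdec : decide (x + 1 ≠ -1) = true := by simpa using h2
      have hdec' : decide (x ≠ -1) = true := by simpa using h
      simp only [List.map_cons, if_neg h, List.filter_cons, hdec, hdec', if_true,
        List.map_cons]
      rw [ih hx']

theorem pvG_cases (d : Char) (rest : List Char) : pvG d rest = -1 ∨ 1 ≤ pvG d rest := by
  unfold pvG
  cases rest.findIdx? (· == d) with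
  | none => left; rfl
  | some j => right; simp

theorem pvG_self (ch : Char) (t : List Char) : pvG ch (ch :: t) = 1 := by
  unfold pvG
  rw [List.findIdx?_cons]
  simp

theorem pvG_cons_ne (d ch : Char) (t : List Char) (h : (ch == d) = false) :
    pvG d (ch :: t) = if pvG d t = -1 then -1 else pvG d t + 1 := by
  unfold pvG
  rw [List.findIdx?_cons, h]
  cases hf : t.findIdx? (· == d) with
  | none => simp
  | some j =>
    have hne : ((j : Int) + 1) ≠ -1 := by omega
    simp [hne]

theorem pv_mem_delims (ch : Char) (hd : pvIsDelim ch = true) : ch ∈ pvDelims := by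
  unfold pvIsDelim at hd
  unfold pvDelims
  simp at hd ⊢
  tauto

theorem pv_ne_of_not_delim (ch : Char) (hd : pvIsDelim ch = false) :
    ∀ d ∈ pvDelims, (ch == d) = false := by
  intro d hmem
  unfold pvDelims at hmem
  fin_cases hmem <;> simp_all [pvIsDelim]

theorem pv_mins (rest : List Char) :
    PySem.List.min? ((pvDelims.map (fun d => pvG d rest)).filter (fun p => decide (p ≠ -1)))
        (fun x => x) =
      (match rest.findIdx? pvIsDelim with
        | some j => some ((j : Int) + 1)
        | none => none) := by
  induction rest with
  | nil => decide
  | cons ch t ih =>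
    by_cases hd : pvIsDelim ch = true
    · rw [List.findIdx?_cons, hd]
      simp only [if_true]
      rw [show ((0 : Nat) : Int) + 1 = 1 from by norm_num]
      apply pv_min?_one
      · rw [List.mem_filter, List.mem_map]
        refine ⟨⟨ch, pv_mem_delims ch hd, pvG_self ch t⟩, by decide⟩
      · intro x hx
        rw [List.mem_filter, List.mem_map] at hx
        obtain ⟨⟨d, _, rfl⟩, hne⟩ := hx
        rcases pvG_cases d (ch :: t) with h | h
        · simp [h] at hne
        · exact h
    · have hdf : pvIsDelim ch = false := by simpa using hd
      rw [List.findIdx?_cons, hdf]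
      simp only [Bool.false_eq_true, if_false]
      have hmap : pvDelims.map (fun d => pvG d (ch :: t)) =
          (pvDelims.map (fun d => pvG d t)).map (fun p => if p = -1 then (-1 : Int) else p + 1) := by
        rw [List.map_map]
        exact List.map_congr_left (fun d hm => pvG_cons_ne d ch t (pv_ne_of_not_delim ch hdf d hm))
      rw [hmap, pv_filter_step _ (by
        intro x hx
        rw [List.mem_map] at hx
        obtain ⟨d, _, rfl⟩ := hx
        exact pvG_cases d t)]
      rw [pv_min?_map_add_one, ih]
      cases t.findIdx? pvIsDelim with
      | none => rfl
      | some j =>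
        simp only [Option.map_some]
        congr 1

-- ===== VERDICT (by name: the statement is the Claim_ definition above) =====
theorem extract_caption_py_spec : Claim_equal_extract_caption_py := by
  intro text _
  unfold Spec_extract_caption_py extract_caption_py extract_caption_py_alt
  cases h : text.toList with
  | nil => decide
  | cons c rest =>
    dsimp only
    rw [pv_loopA_eq]
    have hf : ['\n', '.', '?', '!', ';'].map (fun d => PySem.Chars.findFrom (c :: rest) [d] 1) =
        pvDelims.map (fun d => pvG d rest) := by
      simp [pvDelims, pv_findFrom_cons]
    rw [hf, pv_mins]
    cases hi : rest.findIdx? pvIsDelim with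
    | none =>
      rw [pv_takeIncl_none rest hi]
      dsimp only
      congr 2
      rw [PySem.Chars.slice_eq_listSlice,
        PySem.List.slice_toNat (c :: rest) (a := 1) (b := ((c :: rest).length : Int))
          (by norm_num) (by positivity)]
      simp
    | some j =>
      rw [pv_takeIncl_some rest j hi]
      dsimp only
      congr 2
      rw [PySem.Chars.slice_eq_listSlice,
        PySem.List.slice_toNat (c :: rest) (a := 1) (b := ((j : Int) + 1 + 1))
          (by norm_num) (by positivity)]
      rw [show ((1 : Int)).toNat = 1 from rfl, List.drop_succ_cons, List.drop_zero,
        show ((j : Int) + 1 + 1).toNat - 1 = j + 1 from by omega]
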